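-- pv_equiv track=rewrite | github.com/moiman100/software_maintanance_1a | fibonacci.py | fibonacciWithStartAndLength
-- ===== SOURCE A (Python) =====
-- def fibonacciWithStartAndLength(numbers):
--     previous = 0
--     current = 1
--     fibonacciList = [previous, current]
--     targetIndex = 0
--
--     while True:
--         # Phase 1
--         if numbers["startingNumber"] < current and targetIndex == 0:
--             targetIndex = len(fibonacciList) - 1
--         # Phase 2
--         if (len(fibonacciList) - targetIndex) >= 10 and targetIndex != 0:
--             break
--         # Calculating Fibonacci
--         current = current + previous
--         previous = current - previous
--         fibonacciList.append(current)
--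
--     return fibonacciList[targetIndex:targetIndex + numbers["seriesLength"]]
-- ===== SOURCE B (Python) =====
-- def fibonacciWithStartAndLength(numbers):
--     start = numbers["startingNumber"]
--     count = min(max(numbers["seriesLength"], 0), 10)
--
--     def firstExceeding(p, c):
--         # smallest Fibonacci pair (F(t-1), F(t)) with F(t) > start (t >= 1)
--         return (p, c) if c > start else firstExceeding(c, p + c)
--
--     p, c = firstExceeding(0, 1)
--     out = []
--     for _ in range(count):
--         out.append(c)
--         p, c = c, p + c
--     return out
-- ===== Notes on version B (the rewrite author's own statement) =====
-- stated objective: simpler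
-- what changed: Instead of growing a Fibonacci list under a flag-gated while-True loop and slicing it, B clamps the requested length between 0 and 10 arithmetically, finds the first Fibonacci pair exceeding startingNumber by scalar recursion, and emits exactly that many terms - no prefix list and no slicing ever materialise.
-- intended difference: For negative seriesLength L with -t-10 < L < -t, where t is the first index whose Fibonacci value exceeds startingNumber, A's slice stop t+L is negative and wraps around the end of its length t+10 list so A returns a nonempty tail of consecutive Fibonacci numbers; B returns the empty list, the intended result of requesting a negative number of terms. — e.g. on fibonacciWithStartAndLength([("startingNumber", 0), ("seriesLength", -5)]): A returns [1, 1, 2, 3, 5, 8], B returns []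
-- outside the precondition, e.g. on fibonacciWithStartAndLength({}): A raises KeyError, B raises KeyError
import Mathlib
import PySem

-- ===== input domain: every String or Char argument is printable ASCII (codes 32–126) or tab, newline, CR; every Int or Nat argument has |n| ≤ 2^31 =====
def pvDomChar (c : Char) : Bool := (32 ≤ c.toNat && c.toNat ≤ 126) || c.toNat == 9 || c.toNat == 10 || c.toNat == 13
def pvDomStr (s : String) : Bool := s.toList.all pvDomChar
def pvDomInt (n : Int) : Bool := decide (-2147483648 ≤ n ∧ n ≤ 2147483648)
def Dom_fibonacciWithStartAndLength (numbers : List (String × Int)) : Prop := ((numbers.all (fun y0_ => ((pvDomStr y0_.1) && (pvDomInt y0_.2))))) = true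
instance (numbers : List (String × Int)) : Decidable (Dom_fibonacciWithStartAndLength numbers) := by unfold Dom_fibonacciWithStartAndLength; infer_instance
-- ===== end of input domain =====

-- B clamps the requested length to [0,10], finds the first Fibonacci pair exceeding
-- startingNumber by scalar recursion and emits exactly that many terms — no prefix list,
-- no slice (objective: simpler); on a narrow band of negative seriesLength (D_ below)
-- A's slice stop wraps around the list end and B intentionally returns [] instead.

-- fuel bounds for the loops (totality guards only; on Dom inputs the loops stop far earlier)
def pvFuelA : Nat := 100
def pvFuelB : Nat := 90

-- ===== PORT A =====
def fibALoop (start previous current : Int) (fibonacciList : List Int) (targetIndex : Int) : Nat → List Int × Int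
  | 0 => (fibonacciList, targetIndex)  -- fuel guard, never reached on Dom inputs
  | fuel + 1 =>
    -- Phase 1
    let t := if start < current ∧ targetIndex = 0 then (fibonacciList.length : Int) - 1 else targetIndex
    -- Phase 2
    if (fibonacciList.length : Int) - t ≥ 10 ∧ t ≠ 0 then (fibonacciList, t)
    else
      -- Calculating Fibonacci
      let current' := current + previous
      let previous' := current' - previous
      fibALoop start previous' current' (fibonacciList ++ [current']) t fuel

def fibonacciWithStartAndLength (numbers : List (String × Int)) : List Int :=
  match numbers.find? (fun q => q.1 == "startingNumber"), numbers.find? (fun q => q.1 == "seriesLength") with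
  | some ps, some pl =>
    let r := fibALoop ps.2 0 1 [0, 1] 0 pvFuelA
    PySem.List.slice r.1 (some r.2) (some (r.2 + pl.2))
  | _, _ => []  -- KeyError in Python; excluded by Pre_

-- ===== PORT B =====
-- firstExceeding: smallest Fibonacci pair (F(t-1), F(t)) with start < F(t)
def fibFirstExceeding (start p c : Int) : Nat → Int × Int
  | 0 => (p, c)  -- fuel guard, never reached on Dom inputs
  | fuel + 1 => if start < c then (p, c) else fibFirstExceeding start c (p + c) fuel

-- the emission loop: append c and advance the pair, count times
def fibEmit (p c : Int) (out : List Int) : Nat → List Int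
  | 0 => out
  | n + 1 => fibEmit c (p + c) (out ++ [c]) n

def fibonacciWithStartAndLength_alt (numbers : List (String × Int)) : List Int :=
  match numbers.find? (fun q => q.1 == "startingNumber") with
  | none => []  -- KeyError in Python; excluded by Pre_
  | some ps =>
    match numbers.find? (fun q => q.1 == "seriesLength") with
    | none => []  -- KeyError in Python; excluded by Pre_
    | some pl =>
      let count := (min (max pl.2 0) 10).toNat
      let pc := fibFirstExceeding ps.2 0 1 pvFuelB
      fibEmit pc.1 pc.2 [] count

-- ===== PRECONDITION & SPEC =====
-- Pre_ excludes exactly the inputs on which Python's dict accesses raise KeyError.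
def Pre_fibonacciWithStartAndLength (numbers : List (String × Int)) : Prop :=
  "startingNumber" ∈ numbers.map Prod.fst ∧ "seriesLength" ∈ numbers.map Prod.fst
instance (numbers : List (String × Int)) : Decidable (Pre_fibonacciWithStartAndLength numbers) := by unfold Pre_fibonacciWithStartAndLength; infer_instance

def pvWitness_fibonacciWithStartAndLength : (List (String × Int)) := [("startingNumber", 5), ("seriesLength", 3)]

-- For negative seriesLength L with -t-10 < L < -t (t = first index whose Fibonacci value
-- exceeds startingNumber), A's slice stop t+L is negative and wraps around the end of the
-- length-(t+10) list, so A returns a nonempty tail; B returns [], the intended result of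
-- requesting a negative number of terms.
def D_fibonacciWithStartAndLength (numbers : List (String × Int)) : Prop :=
  let s := (PySem.Dict.mk numbers).getD "startingNumber" 0
  let L := (PySem.Dict.mk numbers).getD "seriesLength" 0
  L < -1 ∧ s < (Nat.fib (-L - 1).toNat : Int) ∧ (1 ≤ -L - 10 → (Nat.fib (-L - 10).toNat : Int) ≤ s)
instance (numbers : List (String × Int)) : Decidable (D_fibonacciWithStartAndLength numbers) := by unfold D_fibonacciWithStartAndLength; infer_instance

def Spec_fibonacciWithStartAndLength (numbers : List (String × Int)) (out : List Int) : Prop :=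
  ¬ D_fibonacciWithStartAndLength numbers → out = fibonacciWithStartAndLength_alt numbers
instance (numbers : List (String × Int)) (out : List Int) : Decidable (Spec_fibonacciWithStartAndLength numbers out) := by unfold Spec_fibonacciWithStartAndLength; infer_instance

def pvDiffWitness_fibonacciWithStartAndLength : (List (String × Int)) := [("startingNumber", 0), ("seriesLength", -5)]
def pvDiffWitnessOut_fibonacciWithStartAndLength : (List Int) × (List Int) := ([1, 1, 2, 3, 5, 8], [])

-- ===== CLAIM (what is proved, stated in full; the proofs are below) =====
def Claim_unchanged_fibonacciWithStartAndLength : Prop := ∀ (numbers : List (String × Int)), Dom_fibonacciWithStartAndLength numbers → Pre_fibonacciWithStartAndLength numbers → Spec_fibonacciWithStartAndLength numbers (fibonacciWithStartAndLength numbers)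
def Claim_changed_fibonacciWithStartAndLength : Prop := Dom_fibonacciWithStartAndLength (pvDiffWitness_fibonacciWithStartAndLength) ∧ Pre_fibonacciWithStartAndLength (pvDiffWitness_fibonacciWithStartAndLength) ∧ D_fibonacciWithStartAndLength (pvDiffWitness_fibonacciWithStartAndLength) ∧ fibonacciWithStartAndLength (pvDiffWitness_fibonacciWithStartAndLength) = pvDiffWitnessOut_fibonacciWithStartAndLength.1 ∧ fibonacciWithStartAndLength_alt (pvDiffWitness_fibonacciWithStartAndLength) = pvDiffWitnessOut_fibonacciWithStartAndLength.2 ∧ pvDiffWitnessOut_fibonacciWithStartAndLength.1 ≠ pvDiffWitnessOut_fibonacciWithStartAndLength.2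
def Claim_exact_fibonacciWithStartAndLength : Prop := ∀ (numbers : List (String × Int)), Dom_fibonacciWithStartAndLength numbers → Pre_fibonacciWithStartAndLength numbers → D_fibonacciWithStartAndLength numbers → fibonacciWithStartAndLength numbers ≠ fibonacciWithStartAndLength_alt numbers

-- ===== LEMMAS AND PROOFS =====

-- the Fibonacci reference sequence (proof-side only)
def fibP : Nat → Int × Int
  | 0 => (0, 1)
  | n + 1 => let q := fibP n; (q.2, q.1 + q.2)
def fibI (n : Nat) : Int := (fibP n).1
def fibList (n : Nat) : List Int := (List.range n).map fibI

lemma fibI_add_two (n : Nat) : fibI (n + 2) = fibI n + fibI (n + 1) := by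
  simp [fibI, fibP]

lemma fibP_bounds (n : Nat) : 0 ≤ (fibP n).1 ∧ 0 < (fibP n).2 := by
  induction n with
  | zero => exact ⟨le_refl 0, one_pos⟩
  | succ n ih => simp only [fibP]; exact ⟨le_of_lt ih.2, by linarith [ih.1, ih.2]⟩

lemma fibI_nonneg (n : Nat) : 0 ≤ fibI n := (fibP_bounds n).1

lemma fibI_mono : Monotone fibI := by
  apply monotone_nat_of_le_succ
  intro n
  cases n with
  | zero => simp [fibI, fibP]
  | succ n => rw [fibI_add_two]; linarith [fibI_nonneg n]

lemma fibI_47 : fibI 47 = 2971215073 := by decide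

lemma fibList_succ (n : Nat) : fibList (n + 1) = fibList n ++ [fibI n] := by
  simp [fibList, List.range_succ]

lemma length_fibList (n : Nat) : (fibList n).length = n := by simp [fibList]

-- proof-side boundary index: tIdx s = least t ≥ 1 whose Fibonacci value exceeds s
def tIdxAux (s p c : Int) (i : Nat) : Nat → Nat
  | 0 => i
  | fuel + 1 => if s < c then i else tIdxAux s c (p + c) (i + 1) fuel
def tIdx (s : Int) : Nat := tIdxAux s 0 1 1 100

-- tIdxAux finds the least index ≥ i whose Fibonacci value exceeds s
lemma tIdxAux_spec (s : Int) : ∀ (fuel i : Nat), 1 ≤ i → s < fibI (i + fuel) →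
    (∀ j, 1 ≤ j → j < i → fibI j ≤ s) →
    1 ≤ tIdxAux s (fibI (i - 1)) (fibI i) i fuel ∧
    s < fibI (tIdxAux s (fibI (i - 1)) (fibI i) i fuel) ∧
    (∀ j, 1 ≤ j → j < tIdxAux s (fibI (i - 1)) (fibI i) i fuel → fibI j ≤ s) := by
  intro fuel
  induction fuel with
  | zero =>
    intro i hi hlt hbelow
    exact ⟨hi, by simpa using hlt, by simpa [tIdxAux] using hbelow⟩
  | succ fuel ih =>
    intro i hi hlt hbelow
    cases i with
    | zero => omega
    | succ m =>
      by_cases hc : s < fibI (m + 1)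
      · rw [show tIdxAux s (fibI (m + 1 - 1)) (fibI (m + 1)) (m + 1) (fuel + 1) = m + 1 from by
          simp [tIdxAux, hc]]
        exact ⟨hi, hc, hbelow⟩
      · have hrec : fibI (m + 1 - 1) + fibI (m + 1) = fibI (m + 2) := by
          have := fibI_add_two m; simp; omega
        have hstep : tIdxAux s (fibI (m + 1 - 1)) (fibI (m + 1)) (m + 1) (fuel + 1)
            = tIdxAux s (fibI (m + 2 - 1)) (fibI (m + 2)) (m + 2) fuel := by
          simp only [tIdxAux, if_neg hc, hrec]
          norm_num
        rw [hstep]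
        refine ih (m + 2) (by omega) (by simpa [Nat.add_assoc, Nat.add_comm, Nat.add_left_comm] using hlt) ?_
        intro j hj hji
        rcases Nat.lt_or_ge j (m + 1) with h | h
        · exact hbelow j hj h
        · have : j = m + 1 := by omega
          subst this; exact le_of_not_gt hc

lemma tIdx_spec (s : Int) (hs : s ≤ 2147483648) :
    1 ≤ tIdx s ∧ s < fibI (tIdx s) ∧ (∀ j, 1 ≤ j → j < tIdx s → fibI j ≤ s) := by
  have h47 : s < fibI 47 := by rw [fibI_47]; omega
  have h100 : s < fibI (1 + 100) := lt_of_lt_of_le h47 (fibI_mono (by omega))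
  have := tIdxAux_spec s 100 1 le_rfl h100 (by intro j hj hji; omega)
  simpa [tIdx, fibI] using this

lemma tIdx_le_47 (s : Int) (hs : s ≤ 2147483648) : tIdx s ≤ 47 := by
  obtain ⟨-, -, hbelow⟩ := tIdx_spec s hs
  by_contra h
  have := hbelow 47 (by omega) (by omega)
  rw [fibI_47] at this; omega

-- phase 2 of A: targetIndex = t already set; grow until the list holds t+10 terms
lemma A_phase2 (s : Int) (t : Nat) (ht : 1 ≤ t) : ∀ (fuel k : Nat), t ≤ k + 1 → k ≤ t + 8 → t + 8 ≤ k + fuel →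
    fibALoop s (fibI k) (fibI (k + 1)) (fibList (k + 2)) (t : Int) fuel = (fibList (t + 10), (t : Int)) := by
  intro fuel
  induction fuel with
  | zero =>
    intro k h1 h2 h3
    have hk : k = t + 8 := by omega
    subst hk
    show (fibList (t + 8 + 2), (t : Int)) = (fibList (t + 10), (t : Int))
    norm_num
  | succ fuel ih =>
    intro k h1 h2 h3
    have harith : fibI (k + 1) + fibI k = fibI (k + 2) := by rw [fibI_add_two]; ring
    simp only [fibALoop, length_fibList]
    have htne : (t : Int) ≠ 0 := by exact_mod_cast (by omega : t ≠ 0)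
    split_ifs with h1' h2' h3'
    · exact absurd h1'.2 htne
    · exact absurd h1'.2 htne
    · have hk : k = t + 8 := by
        have := h3'.1
        push_cast at this
        omega
      subst hk
      norm_num
    · rw [show fibI (k + 1) + fibI k - fibI k = fibI (k + 1) from by ring, harith,
        ← fibList_succ (k + 2)]
      exact ih (k + 1) (by omega) (by push_cast at h3' ⊢; omega) (by omega)

-- phase 0 of A: targetIndex still 0; search for the first exceeding value
lemma A_phase0 (s : Int) (t : Nat) (ht : 1 ≤ t) (hlt : s < fibI t)
    (hbelow : ∀ j, 1 ≤ j → j < t → fibI j ≤ s) : ∀ (fuel k : Nat), k + 1 ≤ t → t + 9 ≤ k + fuel →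
    fibALoop s (fibI k) (fibI (k + 1)) (fibList (k + 2)) 0 fuel = (fibList (t + 10), (t : Int)) := by
  intro fuel
  induction fuel with
  | zero => intro k h1 h2; omega
  | succ fuel ih =>
    intro k h1 h2
    have harith : fibI (k + 1) + fibI k = fibI (k + 2) := by rw [fibI_add_two]; ring
    by_cases hc : k + 1 = t
    · -- the exceeding value appears now: targetIndex is set to k+1 = t
      simp only [fibALoop, length_fibList]
      rw [if_pos (show s < fibI (k + 1) ∧ True from ⟨by rw [hc]; exact hlt, trivial⟩)]
      rw [if_neg (by omega)]
      rw [show fibI (k + 1) + fibI k - fibI k = fibI (k + 1) from by ring, harith,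
        ← fibList_succ (k + 2)]
      rw [show ((k + 2 : Nat) : Int) - 1 = ((t : Nat) : Int) from by push_cast; omega]
      exact A_phase2 s t ht fuel (k + 1) (by omega) (by omega) (by omega)
    · -- fibI (k+1) ≤ s: targetIndex stays 0, grow
      have hle : fibI (k + 1) ≤ s := hbelow (k + 1) (by omega) (by omega)
      simp only [fibALoop, length_fibList]
      rw [if_neg (show ¬ (s < fibI (k + 1) ∧ True) from fun h => absurd h.1 (not_lt.mpr hle))]
      rw [if_neg (by omega)]
      rw [show fibI (k + 1) + fibI k - fibI k = fibI (k + 1) from by ring, harith,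
        ← fibList_succ (k + 2)]
      exact ih (k + 1) (by omega) (by omega)

-- B's search reaches exactly the pair (fibI (t-1), fibI t)
lemma B_search (s : Int) (t : Nat) (hlt : s < fibI t)
    (hbelow : ∀ j, 1 ≤ j → j < t → fibI j ≤ s) : ∀ (fuel k : Nat), 1 ≤ k → k ≤ t → t ≤ k + fuel →
    fibFirstExceeding s (fibI (k - 1)) (fibI k) fuel = (fibI (t - 1), fibI t) := by
  intro fuel
  induction fuel with
  | zero =>
    intro k h1 h2 h3
    have hk : k = t := by omega
    subst hk
    rfl
  | succ fuel ih =>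
    intro k h1 h2 h3
    by_cases hc : s < fibI k
    · have hk : k = t := by
        by_contra h
        exact absurd (hbelow k h1 (by omega)) (not_le.mpr hc)
      subst hk
      simp [fibFirstExceeding, hc]
    · have hkt : k < t := by
        rcases Nat.lt_or_ge k t with h | h
        · exact h
        · have hk : k = t := by omega
          exact absurd (hk ▸ hlt) hc
      have harith : fibI (k - 1) + fibI k = fibI (k + 1) := by
        cases k with
        | zero => omega
        | succ m => simpa using (fibI_add_two m).symm
      simp only [fibFirstExceeding, if_neg hc]
      rw [harith, show fibI k = fibI (k + 1 - 1) from by norm_num]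
      exact ih (k + 1) (by omega) (by omega) (by omega)

-- B's emission loop produces the window starting at index t
lemma fibEmit_eq : ∀ (n t : Nat), 1 ≤ t → ∀ (out : List Int),
    fibEmit (fibI (t - 1)) (fibI t) out n = out ++ (List.range n).map (fun j => fibI (t + j)) := by
  intro n
  induction n with
  | zero => intro t ht out; simp [fibEmit]
  | succ n ih =>
    intro t ht out
    have harith : fibI (t - 1) + fibI t = fibI (t + 1) := by
      cases t with
      | zero => omega
      | succ m => simpa using (fibI_add_two m).symm
    simp only [fibEmit]
    rw [harith, show fibI t = fibI (t + 1 - 1) from by norm_num, ih (t + 1) (by omega),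
      List.append_assoc]
    congr 1
    rw [List.range_succ_eq_map, List.map_cons, List.map_map, List.singleton_append]
    congr 1
    apply List.map_congr_left
    intro a _
    simp only [Function.comp_apply, Nat.succ_eq_add_one]
    congr 1
    omega

-- the reference sequence is Mathlib's Fibonacci sequence
lemma fibI_eq_fib : ∀ n, fibI n = (Nat.fib n : Int) := by
  intro n
  induction n using Nat.twoStepInduction with
  | zero => decide
  | one => decide
  | more n ih1 ih2 => rw [fibI_add_two, Nat.fib_add_two, ih1, ih2]; push_cast; ring

-- D_'s Fibonacci-valued condition says exactly that seriesLength lies in the wraparound band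
lemma D_iff_band (s L : Int) (hs : s ≤ 2147483648) :
    (L < -1 ∧ s < (Nat.fib (-L - 1).toNat : Int) ∧ (1 ≤ -L - 10 → (Nat.fib (-L - 10).toNat : Int) ≤ s))
    ↔ (L < -(tIdx s : Int) ∧ -(tIdx s : Int) - 10 < L) := by
  obtain ⟨ht1, htlt, htbelow⟩ := tIdx_spec s hs
  rw [fibI_eq_fib] at htlt
  constructor
  · rintro ⟨hL, hfib1, hfib2⟩
    have hta : tIdx s ≤ (-L - 1).toNat := by
      by_contra h
      have := htbelow ((-L - 1).toNat) (by omega) (by omega)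
      rw [fibI_eq_fib] at this
      omega
    refine ⟨by omega, ?_⟩
    by_cases h10 : 1 ≤ -L - 10
    · have hle := hfib2 h10
      have hgt : ¬ (tIdx s ≤ (-L - 10).toNat) := by
        intro hcon
        have := fibI_mono hcon
        rw [fibI_eq_fib, fibI_eq_fib] at this
        omega
      omega
    · omega
  · rintro ⟨hb1, hb2⟩
    have hta : tIdx s ≤ (-L - 1).toNat := by omega
    have h1 := fibI_mono hta
    rw [fibI_eq_fib, fibI_eq_fib] at h1
    refine ⟨by omega, by omega, ?_⟩
    intro h10
    have := htbelow ((-L - 10).toNat) (by omega) (by omega)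
    rw [fibI_eq_fib] at this
    omega

-- a found pair lies in the list, so Dom bounds its value
lemma find?_mem_snd_bound (numbers : List (String × Int)) (k : String) (q : String × Int)
    (hDom : Dom_fibonacciWithStartAndLength numbers)
    (h : numbers.find? (fun p => p.1 == k) = some q) :
    -2147483648 ≤ q.2 ∧ q.2 ≤ 2147483648 := by
  have hmem : q ∈ numbers := List.mem_of_find?_eq_some h
  unfold Dom_fibonacciWithStartAndLength at hDom
  rw [List.all_eq_true] at hDom
  have := hDom q hmem
  simp [pvDomInt] at this
  exact this.2

lemma find?_isSome_of_mem (numbers : List (String × Int)) (k : String)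
    (h : k ∈ numbers.map Prod.fst) : (numbers.find? (fun p => p.1 == k)).isSome := by
  rw [List.find?_isSome]
  obtain ⟨q, hq, hk⟩ := List.mem_map.mp h
  exact ⟨q, hq, by simp [hk]⟩

-- the two loop results, assembled: A's loop delivers the full list and the target index
lemma A_value (s : Int) (hs : s ≤ 2147483648) :
    fibALoop s 0 1 [0, 1] 0 pvFuelA = (fibList (tIdx s + 10), (tIdx s : Int)) := by
  obtain ⟨ht1, htlt, htbelow⟩ := tIdx_spec s hs
  have h47 := tIdx_le_47 s hs
  have := A_phase0 s (tIdx s) ht1 htlt htbelow 100 0 (by omega) (by omega)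
  rw [show fibList 2 = [0, 1] from rfl, show fibI 0 = 0 from rfl, show fibI 1 = 1 from rfl] at this
  exact this

-- B's search, assembled
lemma B_value (s : Int) (hs : s ≤ 2147483648) :
    fibFirstExceeding s 0 1 pvFuelB = (fibI (tIdx s - 1), fibI (tIdx s)) := by
  obtain ⟨ht1, htlt, htbelow⟩ := tIdx_spec s hs
  have h47 := tIdx_le_47 s hs
  have := B_search s (tIdx s) htlt htbelow 90 1 le_rfl ht1 (by omega)
  rw [show fibI (1 - 1) = 0 from rfl, show fibI 1 = 1 from rfl] at this
  exact this

-- the prefix of length t splits off the full list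
lemma drop_fibList (t n : Nat) :
    (fibList (t + n)).drop t = (List.range n).map (fun j => fibI (t + j)) := by
  rw [fibList, List.range_add, List.map_append,
    List.drop_left' (by simp), List.map_map]
  rfl

-- ===== VERDICT =====
theorem fibonacciWithStartAndLength_spec : Claim_unchanged_fibonacciWithStartAndLength := by
  intro numbers hDom hPre
  unfold Spec_fibonacciWithStartAndLength
  intro hND
  obtain ⟨h1, h2⟩ := hPre
  obtain ⟨ps, hps⟩ := Option.isSome_iff_exists.mp (find?_isSome_of_mem numbers _ h1)
  obtain ⟨pl, hpl⟩ := Option.isSome_iff_exists.mp (find?_isSome_of_mem numbers _ h2)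
  have hbound := find?_mem_snd_bound numbers _ ps hDom hps
  obtain ⟨ht1, -, -⟩ := tIdx_spec ps.2 hbound.2
  have hband : ¬ (pl.2 < -(tIdx ps.2 : Int) ∧ -(tIdx ps.2 : Int) - 10 < pl.2) := by
    intro h
    refine hND ?_
    unfold D_fibonacciWithStartAndLength
    simp only [PySem.Dict.getD, PySem.Dict.get?, hps, hpl, Option.map_some, Option.getD_some]
    exact (D_iff_band ps.2 pl.2 hbound.2).mpr h
  unfold fibonacciWithStartAndLength fibonacciWithStartAndLength_alt
  rw [hps, hpl]
  simp only [A_value ps.2 hbound.2, B_value ps.2 hbound.2]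
  rw [fibEmit_eq _ (tIdx ps.2) ht1 [], List.nil_append]
  set t := tIdx ps.2 with htdef
  set L := pl.2 with hLdef
  by_cases hpos : 0 ≤ L
  · -- nonnegative length: both sides are the window of min(L,10) terms from index t
    rw [PySem.List.slice_toNat _ (by positivity) (by positivity)]
    rw [show ((t : Int)).toNat = t from by omega,
      show ((t : Int) + L).toNat - t = L.toNat from by omega,
      drop_fibList t 10, ← List.map_take, List.take_range]
    congr 2
    omega
  · -- negative length: the slice is empty and B emits zero terms
    rw [show (min (max L 0) 10).toNat = 0 from by omega, List.range_zero, List.map_nil]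
    apply List.eq_nil_of_length_eq_zero
    rw [PySem.List.length_slice, length_fibList,
      show PySem.List.clampIdx (t + 10) ((t : Int)) = t from by
        rw [PySem.List.clampIdx_natCast]; omega]
    by_cases hb : 0 ≤ (t : Int) + L
    · rw [show (t : Int) + L = ((((t : Int) + L).toNat : Nat) : Int) from by omega,
        PySem.List.clampIdx_natCast]
      omega
    · have hlow : L ≤ -(t : Int) - 10 := by
        rcases not_and_or.mp hband with h | h
        · omega
        · omega
      rw [show (t : Int) + L = -(((-((t : Int) + L)).toNat : Nat) : Int) from by omega,
        PySem.List.clampIdx_neg_natCast _ _ (by omega)]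
      omega

theorem fibonacciWithStartAndLength_changed : Claim_changed_fibonacciWithStartAndLength := by
  unfold Claim_changed_fibonacciWithStartAndLength; decide
theorem fibonacciWithStartAndLength_tight : Claim_exact_fibonacciWithStartAndLength := by
  intro numbers hDom hPre hD
  obtain ⟨h1, h2⟩ := hPre
  obtain ⟨ps, hps⟩ := Option.isSome_iff_exists.mp (find?_isSome_of_mem numbers _ h1)
  obtain ⟨pl, hpl⟩ := Option.isSome_iff_exists.mp (find?_isSome_of_mem numbers _ h2)
  have hbound := find?_mem_snd_bound numbers _ ps hDom hps
  unfold D_fibonacciWithStartAndLength at hD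
  simp only [PySem.Dict.getD, PySem.Dict.get?, hps, hpl, Option.map_some, Option.getD_some] at hD
  have hband := hD
  obtain ⟨ht1, -, -⟩ := tIdx_spec ps.2 hbound.2
  replace hband := (D_iff_band ps.2 pl.2 hbound.2).mp hband
  unfold fibonacciWithStartAndLength fibonacciWithStartAndLength_alt
  rw [hps, hpl]
  simp only [A_value ps.2 hbound.2, B_value ps.2 hbound.2]
  set t := tIdx ps.2 with htdef
  set L := pl.2 with hLdef
  -- B emits zero terms; A's wrapped slice has positive length 10 + (t + L)
  rw [show (min (max L 0) 10).toNat = 0 from by omega]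
  intro hcontra
  have hlen := congrArg List.length hcontra
  rw [PySem.List.length_slice, length_fibList,
    show PySem.List.clampIdx (t + 10) ((t : Int)) = t from by
      rw [PySem.List.clampIdx_natCast]; omega,
    show (t : Int) + L = -(((-((t : Int) + L)).toNat : Nat) : Int) from by omega,
    PySem.List.clampIdx_neg_natCast _ _ (by omega)] at hlen
  simp only [fibEmit, List.length_nil] at hlen
  omega
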